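-- pv_equiv track=rewrite | github.com/udensidev/nigerian-politics-newsletter | agents/collector.py | _get_filter_reason
-- ===== SOURCE A (Python) =====
-- from typing import List, Dict, Any, Optional
--
-- STRONG_POLITICAL_SIGNALS = {
--     "tinubu", "inec", "apc", "pdp", "lp", "efcc", "national assembly",
--     "senate", "presidency", "election", "tribunal", "impeachment",
--     "defection", "budget"
-- }
--
-- WEAK_POLITICAL_SIGNALS = {
--     "governor", "minister", "policy", "bill", "protest", "obi"
-- }
--
-- def _get_filter_reason(matched_keywords: List[str]) -> Optional[str]:
--     strong_matches = [kw for kw in matched_keywords if kw in STRONG_POLITICAL_SIGNALS]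
--     weak_matches = [kw for kw in matched_keywords if kw in WEAK_POLITICAL_SIGNALS]
--
--     if strong_matches:
--         return "strong_keyword"
--     if len(set(weak_matches)) >= 2:
--         return "multiple_contextual_keywords"
--     return None
-- ===== SOURCE B (Python) =====
-- from typing import List, Optional
--
-- STRONG_POLITICAL_SIGNALS = {
--     "tinubu", "inec", "apc", "pdp", "lp", "efcc", "national assembly",
--     "senate", "presidency", "election", "tribunal", "impeachment",
--     "defection", "budget"
-- }
--
-- WEAK_POLITICAL_SIGNALS = {
--     "governor", "minister", "policy", "bill", "protest", "obi"
-- }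
--
-- def _get_filter_reason(matched_keywords: List[str]) -> Optional[str]:
--     weak = set()
--     for kw in matched_keywords:
--         if kw in STRONG_POLITICAL_SIGNALS:
--             return "strong_keyword"
--         if kw in WEAK_POLITICAL_SIGNALS:
--             weak.add(kw)
--     return "multiple_contextual_keywords" if len(weak) >= 2 else None
-- ===== Notes on version B (the rewrite author's own statement) =====
-- stated objective: faster
-- what changed: Two full comprehension passes building strong/weak match lists are replaced by one early-exiting loop that returns on the first strong keyword and maintains a running set of distinct weak keywords.
import Mathlib
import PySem

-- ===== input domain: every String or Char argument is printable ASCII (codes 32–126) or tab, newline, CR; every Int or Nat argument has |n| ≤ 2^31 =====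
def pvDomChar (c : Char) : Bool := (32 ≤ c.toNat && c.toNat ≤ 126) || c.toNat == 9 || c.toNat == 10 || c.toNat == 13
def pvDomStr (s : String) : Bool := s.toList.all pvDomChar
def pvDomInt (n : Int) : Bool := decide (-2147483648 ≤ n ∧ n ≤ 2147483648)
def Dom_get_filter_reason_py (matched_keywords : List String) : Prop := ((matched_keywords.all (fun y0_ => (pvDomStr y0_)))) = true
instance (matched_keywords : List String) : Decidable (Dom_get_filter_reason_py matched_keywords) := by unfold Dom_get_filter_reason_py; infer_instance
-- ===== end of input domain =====

-- B replaces A's two full filter passes by one early-exiting loop keeping a running set of weak hits (objective: simpler).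

-- ===== PORT A =====
def pvStrongSignals : PySem.Set String := PySem.Set.ofList
  ["tinubu", "inec", "apc", "pdp", "lp", "efcc", "national assembly",
   "senate", "presidency", "election", "tribunal", "impeachment",
   "defection", "budget"]

def pvWeakSignals : PySem.Set String := PySem.Set.ofList
  ["governor", "minister", "policy", "bill", "protest", "obi"]

def get_filter_reason_py (matched_keywords : List String) : Option String :=
  let strong_matches := matched_keywords.filter (fun kw => PySem.Set.contains pvStrongSignals kw)
  let weak_matches := matched_keywords.filter (fun kw => PySem.Set.contains pvWeakSignals kw)
  if strong_matches ≠ [] then some "strong_keyword"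
  else if 2 ≤ PySem.Set.len (PySem.Set.ofList weak_matches) then some "multiple_contextual_keywords"
  else none

-- ===== PORT B =====
def pvLoopB : List String → PySem.Set String → Option String
| [], weak => if 2 ≤ PySem.Set.len weak then some "multiple_contextual_keywords" else none
| kw :: rest, weak =>
  if PySem.Set.contains pvStrongSignals kw then some "strong_keyword"
  else pvLoopB rest (if PySem.Set.contains pvWeakSignals kw then PySem.Set.add weak kw else weak)

def get_filter_reason_py_alt (matched_keywords : List String) : Option String :=
  pvLoopB matched_keywords PySem.Set.empty

-- ===== PRECONDITION & SPEC =====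
def Spec_get_filter_reason_py (matched_keywords : List String) (out : Option String) : Prop := out = get_filter_reason_py_alt matched_keywords
instance (matched_keywords : List String) (out : Option String) : Decidable (Spec_get_filter_reason_py matched_keywords out) := by unfold Spec_get_filter_reason_py; infer_instance

-- ===== CLAIM (what is proved, stated in full; the proofs are below) =====
def Claim_equal_get_filter_reason_py : Prop := ∀ (matched_keywords : List String), Dom_get_filter_reason_py matched_keywords → Spec_get_filter_reason_py matched_keywords (get_filter_reason_py matched_keywords)

-- ===== LEMMAS AND PROOFS =====

theorem pvLoopB_eq (l : List String) : ∀ (w : PySem.Set String),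
    pvLoopB l w =
      if l.filter (fun kw => PySem.Set.contains pvStrongSignals kw) ≠ [] then some "strong_keyword"
      else if 2 ≤ PySem.Set.len ((l.filter (fun kw => PySem.Set.contains pvWeakSignals kw)).foldl PySem.Set.add w)
        then some "multiple_contextual_keywords" else none := by
  induction l with
  | nil => intro w; simp [pvLoopB]
  | cons kw rest ih =>
    intro w
    by_cases hs : kw ∈ pvStrongSignals
    · simp [pvLoopB, hs, List.filter_cons]
    · by_cases hw : kw ∈ pvWeakSignals
      · simp [pvLoopB, hs, hw, List.filter_cons, ih]
      · simp [pvLoopB, hs, hw, List.filter_cons, ih]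

-- ===== VERDICT (by name: the statement is the Claim_ definition above) =====
theorem get_filter_reason_py_spec : Claim_equal_get_filter_reason_py := by
  intro l _
  unfold Spec_get_filter_reason_py get_filter_reason_py get_filter_reason_py_alt
  rw [pvLoopB_eq]
  simp [PySem.Set.ofList_eq_foldl, PySem.Set.empty]
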